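-- pv_equiv track=rewrite | github.com/polyphony-dev/polyphony | tests/loop/for05.py | for05
-- ===== SOURCE A (Python) =====
-- def for05(x):
--     s1 = 0
--     s2 = 0
--     for i in range(x):
--         s1 += 1
--         s2 += 2
--         if i == 5:
--             continue
--     return s1 + s2
-- ===== SOURCE B (Python) =====
-- def for05(x):
--     # closed form: each iteration adds 1+2=3; range(x) has max(x,0) iterations
--     return 3 * x if x > 0 else 0
-- ===== Notes on version B (the rewrite author's own statement) =====
-- stated objective: faster
-- what changed: replaced the O(x) accumulation loop by the closed form 3*x (0 for x<=0)
import Mathlib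
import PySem

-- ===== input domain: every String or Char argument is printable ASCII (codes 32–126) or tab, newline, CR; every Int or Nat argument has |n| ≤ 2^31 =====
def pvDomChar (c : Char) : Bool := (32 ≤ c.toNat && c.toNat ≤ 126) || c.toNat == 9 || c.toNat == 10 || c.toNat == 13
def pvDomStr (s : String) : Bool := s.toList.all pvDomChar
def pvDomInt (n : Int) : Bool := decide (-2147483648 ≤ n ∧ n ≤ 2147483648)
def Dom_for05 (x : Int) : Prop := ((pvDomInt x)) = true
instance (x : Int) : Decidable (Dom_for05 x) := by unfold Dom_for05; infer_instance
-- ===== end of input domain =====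

-- B replaces A's O(x) accumulation loop with the closed form 3*x (0 for x <= 0).
-- ===== PORT A =====
-- the 'if i == 5: continue' at the end of A's loop body is a no-op and ports to nothing
def for05 (x : Int) : Int :=
  let st := (PySem.List.pyRange 0 x 1).foldl
    (fun (s : Int × Int) (_i : Int) => (s.1 + 1, s.2 + 2)) (0, 0)
  st.1 + st.2

-- ===== PORT B =====
def for05_alt (x : Int) : Int := if x > 0 then 3 * x else 0

-- ===== PRECONDITION & SPEC =====
def Spec_for05 (x : Int) (out : Int) : Prop := out = for05_alt x
instance (x : Int) (out : Int) : Decidable (Spec_for05 x out) := by unfold Spec_for05; infer_instance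

-- ===== CLAIM (what is proved, stated in full; the proofs are below) =====
def Claim_equal_for05 : Prop := ∀ (x : Int), Dom_for05 x → Spec_for05 x (for05 x)

-- ===== LEMMAS AND PROOFS =====
lemma foldl_add_pair (l : List Int) (a b : Int) :
    l.foldl (fun (s : Int × Int) (_i : Int) => (s.1 + 1, s.2 + 2)) (a, b)
      = (a + l.length, b + 2 * l.length) := by
  induction l generalizing a b with
  | nil => simp
  | cons h t ih => simp [List.foldl, ih]; constructor <;> push_cast <;> ring


-- ===== VERDICT (by name: the statement is the Claim_ definition above) =====
theorem for05_spec : Claim_equal_for05 := by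
  intro x _
  unfold Spec_for05 for05 for05_alt
  rw [foldl_add_pair]
  simp [PySem.List.length_pyRange_one]
  split_ifs with h <;> omega
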